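-- pv_equiv track=rewrite | github.com/shakfu/coremusic | tests/demos/neural/train_generate.py | get_model_encoder_combinations
-- ===== SOURCE A (Python) =====
-- from typing import List, Optional, Tuple
--
-- def get_model_encoder_combinations(
--     model: Optional[str],
--     encoder: Optional[str],
--     train_all: bool
-- ) -> List[Tuple[str, str]]:
--     """Get list of (model_type, encoder_type) combinations to train."""
--     all_models = ["mlp", "lstm", "gru"]
--     all_encoders = ["note", "event", "pianoroll", "relative"]
--
--     # Encoders with large vocab sizes that are impractical with MLP
--     large_vocab_encoders = {"event", "pianoroll"}
--
--     if train_all: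
--         # All combinations except MLP with large-vocab encoders (impractically slow)
--         combinations = []
--         for m in all_models:
--             for e in all_encoders:
--                 if m == "mlp" and e in large_vocab_encoders:
--                     continue  # Skip slow combinations
--                 combinations.append((m, e))
--         return combinations
--
--     # Single combination
--     model_type = model or "lstm"
--     encoder_type = encoder or "note"
--     return [(model_type, encoder_type)]
-- ===== SOURCE B (Python) =====
-- from typing import List, Optional, Tuple
--
-- _ALL_COMBINATIONS = [
--     ("mlp", "note"), ("mlp", "relative"),
--     ("lstm", "note"), ("lstm", "event"), ("lstm", "pianoroll"), ("lstm", "relative"),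
--     ("gru", "note"), ("gru", "event"), ("gru", "pianoroll"), ("gru", "relative"),
-- ]
--
-- def get_model_encoder_combinations(
--     model: Optional[str],
--     encoder: Optional[str],
--     train_all: bool
-- ) -> List[Tuple[str, str]]:
--     """Get list of (model_type, encoder_type) combinations to train."""
--     if train_all:
--         return list(_ALL_COMBINATIONS)
--     return [(model or "lstm", encoder or "note")]
-- ===== Notes on version B (the rewrite author's own statement) =====
-- stated objective: simpler
-- what changed: Replaced the nested compute-and-filter loops over models x encoders with a precomputed literal table of the 10 combinations in the same order.
import Mathlib
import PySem

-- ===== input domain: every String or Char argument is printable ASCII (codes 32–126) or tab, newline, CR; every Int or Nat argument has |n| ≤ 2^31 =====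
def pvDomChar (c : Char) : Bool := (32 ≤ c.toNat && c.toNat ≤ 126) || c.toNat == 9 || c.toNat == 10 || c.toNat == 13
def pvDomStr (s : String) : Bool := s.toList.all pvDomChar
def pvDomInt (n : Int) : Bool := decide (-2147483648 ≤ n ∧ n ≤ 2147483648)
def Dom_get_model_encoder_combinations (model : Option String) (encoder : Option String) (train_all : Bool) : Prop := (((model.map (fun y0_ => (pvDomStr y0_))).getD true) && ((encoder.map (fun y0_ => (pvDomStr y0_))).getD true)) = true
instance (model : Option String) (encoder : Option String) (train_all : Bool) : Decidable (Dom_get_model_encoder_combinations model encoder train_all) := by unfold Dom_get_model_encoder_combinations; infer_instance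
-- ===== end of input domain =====

-- B replaces the nested loop-and-skip with a precomputed literal table (objective: simpler).

-- ===== PORT A =====
-- Python `x or d` on Optional[str]: default when None or empty string.
def pyOrStr (x : Option String) (d : String) : String :=
  match x with
  | none => d
  | some s => if s = "" then d else s

def get_model_encoder_combinations (model : Option String) (encoder : Option String) (train_all : Bool) : List (String × String) :=
  let all_models := ["mlp", "lstm", "gru"]
  let all_encoders := ["note", "event", "pianoroll", "relative"]
  let large_vocab_encoders : PySem.Set String := PySem.Set.ofList ["event", "pianoroll"]
  if train_all then
    all_models.foldl (fun combinations m =>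
      all_encoders.foldl (fun combinations e =>
        if m = "mlp" ∧ e ∈ large_vocab_encoders then combinations
        else combinations ++ [(m, e)]) combinations) []
  else
    let model_type := pyOrStr model "lstm"
    let encoder_type := pyOrStr encoder "note"
    [(model_type, encoder_type)]

-- ===== PORT B =====
def pvAllCombinations : List (String × String) :=
  [("mlp", "note"), ("mlp", "relative"),
   ("lstm", "note"), ("lstm", "event"), ("lstm", "pianoroll"), ("lstm", "relative"),
   ("gru", "note"), ("gru", "event"), ("gru", "pianoroll"), ("gru", "relative")]

def get_model_encoder_combinations_alt (model : Option String) (encoder : Option String) (train_all : Bool) : List (String × String) :=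
  if train_all then pvAllCombinations
  else [(pyOrStr model "lstm", pyOrStr encoder "note")]

-- ===== PRECONDITION & SPEC =====
def Spec_get_model_encoder_combinations (model : Option String) (encoder : Option String) (train_all : Bool) (out : List (String × String)) : Prop := out = get_model_encoder_combinations_alt model encoder train_all
instance (model : Option String) (encoder : Option String) (train_all : Bool) (out : List (String × String)) : Decidable (Spec_get_model_encoder_combinations model encoder train_all out) := by unfold Spec_get_model_encoder_combinations; infer_instance

-- ===== CLAIM (what is proved, stated in full; the proofs are below) =====
def Claim_equal_get_model_encoder_combinations : Prop := ∀ (model : Option String) (encoder : Option String) (train_all : Bool), Dom_get_model_encoder_combinations model encoder train_all → Spec_get_model_encoder_combinations model encoder train_all (get_model_encoder_combinations model encoder train_all)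

-- ===== LEMMAS AND PROOFS =====

-- ===== VERDICT (by name: the statement is the Claim_ definition above) =====
theorem get_model_encoder_combinations_spec : Claim_equal_get_model_encoder_combinations := by
  intro model encoder train_all _
  unfold Spec_get_model_encoder_combinations get_model_encoder_combinations get_model_encoder_combinations_alt
  cases train_all
  · rfl
  · simp [PySem.Set.ofList, pvAllCombinations]
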